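-- pv_equiv track=rewrite | github.com/pypi-data/pypi-mirror-334 | packages/polars_expr_transformer/polars_expr_transformer-0.4.4.0.tar.gz/polars_expr_transformer-0.4.4.0/polars_expr_transformer/utils/utils.py | replace_commas
-- ===== SOURCE A (Python) =====
-- def replace_commas(input_str: str) -> str:
--     in_quotes = False
--     data = []
--     for w in input_str:
--         if w in ('"', "'"):
--             in_quotes = not in_quotes
--         if w == ',' and in_quotes:
--             w = '%^%'
--         data.append(w)
--     return ''.join(data)
-- ===== SOURCE B (Python) =====
-- def replace_commas(input_str: str) -> str:
--     # Mark every quote (of either kind) with a sentinel, split on the sentinel: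
--     # pieces at odd indices are the inside-quotes regions.
--     marked = input_str.replace('"', '"\x00').replace("'", "'\x00")
--     parts = marked.split('\x00')
--     return ''.join(p.replace(',', '%^%') if i % 2 else p
--                    for i, p in enumerate(parts))
-- ===== Notes on version B (the rewrite author's own statement) =====
-- stated objective: faster
-- what changed: Replaces the char-by-char loop with a mutable in_quotes flag by a sentinel-split decomposition: mark every quote (of either kind) with a sentinel via str.replace, split on the sentinel, rewrite commas to the placeholder only in the odd-indexed (inside-quotes) pieces, and join.
import Mathlib
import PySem

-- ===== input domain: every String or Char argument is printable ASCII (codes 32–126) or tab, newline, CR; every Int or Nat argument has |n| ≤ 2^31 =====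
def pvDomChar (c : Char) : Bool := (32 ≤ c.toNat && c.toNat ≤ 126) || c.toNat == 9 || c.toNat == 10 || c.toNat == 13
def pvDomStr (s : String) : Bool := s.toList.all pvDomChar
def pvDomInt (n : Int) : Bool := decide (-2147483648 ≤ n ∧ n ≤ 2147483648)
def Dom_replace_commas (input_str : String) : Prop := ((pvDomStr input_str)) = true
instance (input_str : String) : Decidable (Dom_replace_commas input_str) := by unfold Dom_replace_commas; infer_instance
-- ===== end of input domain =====

-- B replaces the char-by-char quote-state loop by a sentinel-split decomposition
-- (mark each quote, split on the sentinel, rewrite commas in the odd pieces);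
-- objective: a segment-wise decomposition (measurably faster in a timing run), same return value.

-- ===== PORT A =====
-- the body of A's for-loop (state: (in_quotes, data))
def replaceCommasStep (acc : Bool × List String) (w : Char) : Bool × List String :=
  let in_quotes := if w = '"' ∨ w = '\'' then !acc.1 else acc.1
  let w' := if w = ',' ∧ in_quotes then "%^%" else String.ofList [w]
  (in_quotes, acc.2 ++ [w'])

def replace_commas (input_str : String) : String :=
  let st := input_str.toList.foldl replaceCommasStep (false, [])
  PySem.Str.join "" st.2

-- ===== PORT B =====
def replace_commas_alt (input_str : String) : String :=
  let marked := PySem.Chars.replace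
      (PySem.Chars.replace input_str.toList ['"'] ['"', '\x00']) ['\''] ['\'', '\x00']
  let parts := PySem.Chars.splitOn marked ['\x00']
  String.ofList (PySem.Chars.join []
    ((PySem.List.enumerate parts 0).map
      (fun ip => if PySem.Int.mod ip.1 2 ≠ 0
                 then PySem.Chars.replace ip.2 [','] ['%', '^', '%']
                 else ip.2)))

-- ===== PRECONDITION & SPEC =====
def Spec_replace_commas (input_str : String) (out : String) : Prop := out = replace_commas_alt input_str
instance (input_str : String) (out : String) : Decidable (Spec_replace_commas input_str out) := by unfold Spec_replace_commas; infer_instance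

-- ===== CLAIM (what is proved, stated in full; the proofs are below) =====
def Claim_equal_replace_commas : Prop := ∀ (input_str : String), Dom_replace_commas input_str → Spec_replace_commas input_str (replace_commas input_str)

-- ===== LEMMAS AND PROOFS =====

-- reference function: A's loop, char-by-char, as a structural recursion
def pvGoA : List Char → Bool → List Char
  | [], _ => []
  | c :: t, q =>
    let q' := if c = '"' ∨ c = '\'' then !q else q
    (if c = ',' ∧ q' then ['%', '^', '%'] else [c]) ++ pvGoA t q'

-- single-char str.replace as a flatMap substitution
def pvRepl (q : Char) (new : List Char) (l : List Char) : List Char :=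
  l.flatMap (fun c => if c = q then new else [c])

lemma pvRepl_cons (q : Char) (new : List Char) (c : Char) (t : List Char) :
    pvRepl q new (c :: t) = (if c = q then new else [c]) ++ pvRepl q new t := by
  simp [pvRepl]

lemma pvRepl_append (q : Char) (new : List Char) (a b : List Char) :
    pvRepl q new (a ++ b) = pvRepl q new a ++ pvRepl q new b := by
  simp [pvRepl]

lemma pv_replace_go_single (q : Char) (new : List Char) :
    ∀ (l : List Char) (fuel : Nat) (acc : List Char), l.length ≤ fuel →
      PySem.Chars.replace.go [q] new fuel l acc = acc.reverse ++ pvRepl q new l := by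
  intro l
  induction l with
  | nil =>
    intro fuel acc _
    cases fuel <;> simp [PySem.Chars.replace.go, pvRepl]
  | cons c t ih =>
    intro fuel acc hle
    cases fuel with
    | zero => simp at hle
    | succ f =>
      simp only [PySem.Chars.replace.go]
      by_cases hc : q = c
      · subst hc
        have hpre : ([q].isPrefixOf (q :: t)) = true := by simp [List.isPrefixOf]
        rw [hpre]
        simp only [if_true]
        rw [show List.drop [q].length (q :: t) = t from rfl]
        rw [ih f (new.reverse ++ acc) (by simpa using hle)]
        simp [pvRepl_cons]
      · have hpre : ([q].isPrefixOf (c :: t)) = false := by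
          simp [List.isPrefixOf]
          exact fun h => hc h
        rw [hpre]
        simp only [Bool.false_eq_true, if_false]
        rw [ih f (c :: acc) (by simpa using hle)]
        have : c ≠ q := fun h => hc h.symm
        simp [pvRepl_cons, this]

lemma pv_chars_replace_single (l : List Char) (q : Char) (new : List Char) :
    PySem.Chars.replace l [q] new = pvRepl q new l := by
  have := pv_replace_go_single q new l l.length [] le_rfl
  simpa [PySem.Chars.replace] using this

-- splitting on the sentinel, structurally
def pvConsHead (c : Char) : List (List Char) → List (List Char)
  | [] => [[c]]
  | p :: ps => (c :: p) :: ps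

def pvSplitN : List Char → List (List Char)
  | [] => [[]]
  | c :: t => if c = '\x00' then [] :: pvSplitN t else pvConsHead c (pvSplitN t)

lemma pvSplitN_ne_nil (l : List Char) : pvSplitN l ≠ [] := by
  cases l with
  | nil => simp [pvSplitN]
  | cons c t =>
    simp only [pvSplitN]
    split
    · simp
    · cases h : pvSplitN t <;> simp [pvConsHead]

def pvConsAll (pre : List Char) : List (List Char) → List (List Char)
  | [] => [pre]
  | p :: ps => (pre ++ p) :: ps

lemma pv_splitOn_go_N :
    ∀ (l : List Char) (fuel : Nat) (cur : List Char) (accs : List (List Char)),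
      l.length ≤ fuel →
      PySem.Chars.splitOn.go ['\x00'] fuel l cur accs =
        accs.reverse ++ pvConsAll cur.reverse (pvSplitN l) := by
  intro l
  induction l with
  | nil =>
    intro fuel cur accs _
    cases fuel <;> simp [PySem.Chars.splitOn.go, pvSplitN, pvConsAll]
  | cons c t ih =>
    intro fuel cur accs hle
    cases fuel with
    | zero => simp at hle
    | succ f =>
      simp only [PySem.Chars.splitOn.go]
      by_cases hc : c = '\x00'
      · subst hc
        have hpre : (['\x00'].isPrefixOf ('\x00' :: t)) = true := by simp [List.isPrefixOf]
        rw [hpre]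
        simp only [if_true]
        rw [show List.drop (['\x00'] : List Char).length ('\x00' :: t) = t from rfl]
        rw [ih f [] (cur.reverse :: accs) (by simpa using hle)]
        cases h : pvSplitN t with
        | nil => exact absurd h (pvSplitN_ne_nil t)
        | cons p ps => simp [pvSplitN, pvConsAll, h]
      · have hpre : (['\x00'].isPrefixOf (c :: t)) = false := by
          simp [List.isPrefixOf]
          exact fun h => hc h.symm
        rw [hpre]
        simp only [Bool.false_eq_true, if_false]
        rw [ih f (c :: cur) accs (by simpa using hle)]
        cases h : pvSplitN t with
        | nil => exact absurd h (pvSplitN_ne_nil t)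
        | cons p ps => simp [pvSplitN, pvConsAll, pvConsHead, hc, h]

lemma pv_chars_splitOn_N (l : List Char) :
    PySem.Chars.splitOn l ['\x00'] = pvSplitN l := by
  have := pv_splitOn_go_N l (l.length + 1) [] [] (by omega)
  cases h : pvSplitN l with
  | nil => exact absurd h (pvSplitN_ne_nil l)
  | cons p ps => simpa [PySem.Chars.splitOn, pvConsAll, h] using this

-- the marking pass: both quote replacements fused into one substitution
def pvMark (c : Char) : List Char :=
  if c = '"' then ['"', '\x00'] else if c = '\'' then ['\'', '\x00'] else [c]

lemma pv_mark_flat (l : List Char) :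
    pvRepl '\'' ['\'', '\x00'] (pvRepl '"' ['"', '\x00'] l) = l.flatMap pvMark := by
  induction l with
  | nil => simp [pvRepl]
  | cons c t ih =>
    rw [pvRepl_cons, pvRepl_append, List.flatMap_cons, ih]
    congr 1
    by_cases h1 : c = '"'
    · subst h1; decide
    · by_cases h2 : c = '\''
      · subst h2; decide
      · simp [pvMark, pvRepl, h1, h2]

lemma pv_marked_eq (l : List Char) :
    PySem.Chars.replace (PySem.Chars.replace l ['"'] ['"', '\x00']) ['\''] ['\'', '\x00']
      = l.flatMap pvMark := by
  rw [pv_chars_replace_single, pv_chars_replace_single, pv_mark_flat]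

-- join with empty separator is flatten
lemma pv_join_nil_flatten (ps : List (List Char)) :
    PySem.Chars.join [] ps = ps.flatten := by
  induction ps with
  | nil => simp [PySem.Chars.join, List.intercalate]
  | cons p ps ih =>
    cases ps with
    | nil => simp [PySem.Chars.join, List.intercalate]
    | cons q qs =>
      simp [PySem.Chars.join, List.intercalate] at ih ⊢
      simpa using ih

-- B's segment pass, structurally (parity flips at each piece boundary)
def pvProcB : Bool → List (List Char) → List Char
  | _, [] => []
  | q, p :: ps => (if q then pvRepl ',' ['%', '^', '%'] p else p) ++ pvProcB (!q) ps

lemma pv_procB_consHead (q : Bool) (c : Char) (ps : List (List Char)) (h : ps ≠ []) :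
    pvProcB q (pvConsHead c ps)
      = (if q then (if c = ',' then ['%', '^', '%'] else [c]) else [c]) ++ pvProcB q ps := by
  cases ps with
  | nil => exact absurd rfl h
  | cons p rest =>
    simp only [pvConsHead, pvProcB]
    by_cases hq : q
    · subst hq
      simp [pvRepl_cons]
    · simp [hq]

lemma pv_enum_join (ps : List (List Char)) :
    ∀ (n : Nat),
      ((PySem.List.enumerate ps (n : Int)).map
        (fun ip => if PySem.Int.mod ip.1 2 ≠ 0
                   then pvRepl ',' ['%', '^', '%'] ip.2 else ip.2)).flatten
        = pvProcB (n % 2 == 1) ps := by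
  induction ps with
  | nil => intro n; simp [PySem.List.enumerate_nil, pvProcB]
  | cons p ps ih =>
    intro n
    rw [PySem.List.enumerate_cons]
    have hmod : PySem.Int.mod (n : Int) 2 = ((n % 2 : Nat) : Int) := by
      rw [PySem.Int.mod_eq_emod_of_pos (by omega)]
      omega
    have hstep : ((n : Int) + 1) = ((n + 1 : Nat) : Int) := by push_cast; ring
    simp only [List.map_cons, List.flatten_cons, hstep]
    rw [ih (n + 1)]
    have hpar : ((n + 1) % 2 == 1) = !(n % 2 == 1) := by
      rcases Nat.mod_two_eq_zero_or_one n with h | h <;> simp [Nat.add_mod, h]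
    rw [hpar]
    by_cases hq : n % 2 = 1
    · have hne : PySem.Int.mod (n : Int) 2 ≠ 0 := by
        rw [hmod, hq]; decide
      rw [if_pos hne]
      simp [pvProcB, hq]
    · have h0 : n % 2 = 0 := by omega
      have hne : ¬ (PySem.Int.mod (n : Int) 2 ≠ 0) := by
        rw [hmod, h0]; decide
      rw [if_neg hne]
      simp [pvProcB, h0]

-- main: B's segment pass equals A's char loop on sentinel-free input
lemma pv_main (l : List Char) :
    ∀ (q : Bool), '\x00' ∉ l →
      pvProcB q (pvSplitN (l.flatMap pvMark)) = pvGoA l q := by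
  induction l with
  | nil => intro q _; simp [pvSplitN, pvProcB, pvGoA, pvRepl]
  | cons c t ih =>
    intro q hN
    have hcN : c ≠ '\x00' := fun h => hN (by simp [h])
    have htN : '\x00' ∉ t := fun h => hN (List.mem_cons_of_mem _ h)
    by_cases hquote : c = '"' ∨ c = '\''
    · have hmark : pvMark c = [c, '\x00'] := by
        rcases hquote with h | h <;> subst h <;> decide
      have hcomma : c ≠ ',' := by rcases hquote with h | h <;> subst h <;> decide
      simp only [List.flatMap_cons, hmark, List.cons_append, List.nil_append]
      have hsplit : pvSplitN (c :: '\x00' :: t.flatMap pvMark)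
          = [c] :: pvSplitN (t.flatMap pvMark) := by
        simp [pvSplitN, hcN, pvConsHead]
      rw [hsplit]
      simp only [pvProcB]
      rw [ih (!q) htN]
      have hrepl : pvRepl ',' ['%', '^', '%'] [c] = [c] := by
        simp [pvRepl, hcomma]
      simp [pvGoA, hquote, hrepl, hcomma]
    · have hq1 : c ≠ '"' := fun h => hquote (Or.inl h)
      have hq2 : c ≠ '\'' := fun h => hquote (Or.inr h)
      have hmark : pvMark c = [c] := by simp [pvMark, hq1, hq2]
      simp only [List.flatMap_cons, hmark, List.cons_append, List.nil_append]
      have hsplit : pvSplitN (c :: t.flatMap pvMark)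
          = pvConsHead c (pvSplitN (t.flatMap pvMark)) := by
        simp [pvSplitN, hcN]
      rw [hsplit, pv_procB_consHead q c _ (pvSplitN_ne_nil _)]
      rw [ih q htN]
      by_cases hc : c = ','
      · cases q <;> simp [pvGoA, hc]
      · cases q <;> simp [pvGoA, hq1, hq2, hc]

-- A's foldl accumulates exactly pvGoA
lemma pv_A_fold (l : List Char) :
    ∀ (q : Bool) (accs : List String),
      ((l.foldl replaceCommasStep (q, accs)).2.map String.toList).flatten
        = (accs.map String.toList).flatten ++ pvGoA l q := by
  induction l with
  | nil => intro q accs; simp [pvGoA]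
  | cons c t ih =>
    intro q accs
    simp only [List.foldl_cons, replaceCommasStep]
    rw [ih]
    simp only [List.map_append, List.flatten_append]
    have hp : ("%^%" : String).toList = ['%', '^', '%'] := rfl
    have ho : ∀ d : Char, (String.ofList [d]).toList = [d] := fun d => by simp
    by_cases hquote : c = '"' ∨ c = '\''
    · have hcm : c ≠ ',' := by rcases hquote with h | h <;> subst h <;> decide
      simp [pvGoA, hquote, hcm, ho]
    · by_cases hc : c = ','
      · subst hc
        cases q <;> simp [pvGoA, ho]
      · simp [pvGoA, hquote, hc, ho]

lemma pv_A_toList (s : String) :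
    (replace_commas s).toList = pvGoA s.toList false := by
  unfold replace_commas
  have hf := pv_A_fold s.toList false []
  simp only [List.map_nil, List.flatten_nil, List.nil_append] at hf
  simp [PySem.Str.join, pv_join_nil_flatten, hf]

lemma pv_B_toList (s : String) (h : '\x00' ∉ s.toList) :
    (replace_commas_alt s).toList = pvGoA s.toList false := by
  simp only [replace_commas_alt, pv_marked_eq, pv_chars_splitOn_N]
  have hin : (fun ip : Int × List Char =>
        if PySem.Int.mod ip.1 2 ≠ 0
        then PySem.Chars.replace ip.2 [','] ['%', '^', '%'] else ip.2)
      = (fun ip : Int × List Char =>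
        if PySem.Int.mod ip.1 2 ≠ 0
        then pvRepl ',' ['%', '^', '%'] ip.2 else ip.2) := by
    funext ip
    rw [pv_chars_replace_single]
  rw [hin]
  have he := pv_enum_join (pvSplitN (s.toList.flatMap pvMark)) 0
  simp only [Nat.cast_zero] at he
  have he' : ((PySem.List.enumerate (pvSplitN (s.toList.flatMap pvMark)) 0).map
      (fun ip : Int × List Char =>
        if PySem.Int.mod ip.1 2 ≠ 0
        then pvRepl ',' ['%', '^', '%'] ip.2 else ip.2)).flatten
      = pvProcB false (pvSplitN (s.toList.flatMap pvMark)) := by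
    simpa using he
  rw [pv_join_nil_flatten, he', pv_main s.toList false h]
  simp

-- ===== VERDICT (by name: the statement is the Claim_ definition above) =====
theorem replace_commas_spec : Claim_equal_replace_commas := by
  intro s hdom
  unfold Spec_replace_commas
  have hN : '\x00' ∉ s.toList := by
    intro hmem
    have := List.all_eq_true.mp hdom _ hmem
    simp [pvDomChar] at this
  apply String.toList_inj.mp
  rw [pv_A_toList, pv_B_toList s hN]
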